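-- pv_equiv track=rewrite | github.com/soodal5629/codingTestProblemSolve | 대충 만든 자판.py | solution
-- ===== SOURCE A (Python) =====
-- from collections import defaultdict
--
-- def solution(keymap, targets):
--     answer = []
--     d = defaultdict(int)
--     for i in keymap:
--         for j, v in enumerate(i):
--             if d[v] == 0: # 처음 등장
--                 d[v] = j+1
--             else:
--                 d[v] = min(d[v], j+1)
--     for i in targets:
--         temp = 0
--         for j in i:
--             temp += d[j]
--         if temp == 0: temp = -1
--         answer.append(temp)
--     return answer
-- ===== SOURCE B (Python) =====
-- def solution(keymap, targets):
--     answer = []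
--     for t in targets:
--         temp = 0
--         for c in t:
--             best = 0
--             for k in keymap:
--                 p = k.find(c)
--                 if p != -1 and (best == 0 or p + 1 < best):
--                     best = p + 1
--             temp += best
--         answer.append(temp if temp != 0 else -1)
--     return answer
-- ===== Notes on version B (the rewrite author's own statement) =====
-- stated objective: alternative
-- what changed: B drops A's prebuilt defaultdict index entirely: for each target character it rescans the keymap with str.find to get the minimum 1-based position directly (0 if absent) and sums per target.
import Mathlib
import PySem

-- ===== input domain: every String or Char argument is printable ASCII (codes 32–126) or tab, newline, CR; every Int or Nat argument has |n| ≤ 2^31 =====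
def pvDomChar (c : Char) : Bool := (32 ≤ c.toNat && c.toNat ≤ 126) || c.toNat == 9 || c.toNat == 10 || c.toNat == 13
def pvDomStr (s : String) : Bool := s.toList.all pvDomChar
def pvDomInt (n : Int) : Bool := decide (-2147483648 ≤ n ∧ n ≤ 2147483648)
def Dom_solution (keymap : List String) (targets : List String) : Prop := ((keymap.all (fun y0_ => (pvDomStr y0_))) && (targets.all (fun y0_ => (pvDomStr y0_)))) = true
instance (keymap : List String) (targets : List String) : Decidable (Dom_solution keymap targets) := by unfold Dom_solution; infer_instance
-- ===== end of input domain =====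

-- B replaces A's prebuilt defaultdict of minimum key positions by a direct per-character rescan
-- of the keymap (objective: alternative decomposition, no dictionary); same return values.

-- ===== PORT A =====
-- d[v] on the defaultdict yields 0 for a missing key; the subsequent assignment d[v] = …
-- makes the net effect of each step an insert, so getD v 0 models the read exactly.
def solutionBuild (keymap : List String) : PySem.Dict Char Int :=
  keymap.foldl (fun d i =>
    (PySem.List.enumerate i.toList).foldl (fun d jv =>
      if d.getD jv.2 0 == 0 then d.insert jv.2 (jv.1 + 1)
      else d.insert jv.2 (min (d.getD jv.2 0) (jv.1 + 1))) d) PySem.Dict.empty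

def solution (keymap : List String) (targets : List String) : List Int :=
  let d := solutionBuild keymap
  targets.foldl (fun answer i =>
    let temp := i.toList.foldl (fun temp j => temp + d.getD j 0) 0
    answer ++ [if temp == 0 then -1 else temp]) []

-- ===== PORT B =====
-- k.find(c) on a 1-char string c → PySem.Str.find k (String.ofList [c])
def solutionAltBest (keymap : List String) (c : Char) : Int :=
  keymap.foldl (fun best k =>
    let p := PySem.Str.find k (String.ofList [c])
    if p != -1 && (best == 0 || p + 1 < best) then p + 1 else best) 0

def solution_alt (keymap : List String) (targets : List String) : List Int :=
  targets.foldl (fun answer t =>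
    let temp := t.toList.foldl (fun temp c => temp + solutionAltBest keymap c) 0
    answer ++ [if temp != 0 then temp else -1]) []

-- ===== PRECONDITION & SPEC =====
def Spec_solution (keymap : List String) (targets : List String) (out : List Int) : Prop := out = solution_alt keymap targets
instance (keymap : List String) (targets : List String) (out : List Int) : Decidable (Spec_solution keymap targets out) := by unfold Spec_solution; infer_instance

-- ===== CLAIM (what is proved, stated in full; the proofs are below) =====
def Claim_equal_solution : Prop := ∀ (keymap : List String) (targets : List String), Dom_solution keymap targets → Spec_solution keymap targets (solution keymap targets)

-- ===== LEMMAS AND PROOFS =====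

-- one enumerated string: the dict's value at c evolves exactly like B's running 'best' for c
lemma inner_step (l : List (Int × Char)) (d : PySem.Dict Char Int) (c : Char) :
    (l.foldl (fun d jv =>
      if d.getD jv.2 0 == 0 then d.insert jv.2 (jv.1 + 1)
      else d.insert jv.2 (min (d.getD jv.2 0) (jv.1 + 1))) d).getD c 0
    = l.foldl (fun best jv =>
        if jv.2 == c && (best == 0 || jv.1 + 1 < best) then jv.1 + 1 else best) (d.getD c 0) := by
  induction l generalizing d with
  | nil => rfl
  | cons jv rest ih =>
    simp only [List.foldl_cons]
    rw [ih]
    congr 1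
    by_cases hc : jv.2 = c
    · subst hc
      by_cases h0 : d.getD jv.2 0 = 0
      · simp [h0, PySem.Dict.getD_insert_self]
      · simp only [h0, beq_iff_eq, if_false]
        by_cases hlt : jv.1 + 1 < d.getD jv.2 0
        · simp [hlt, min_eq_right (le_of_lt hlt)]
        · simp [hlt, h0, min_eq_left (by omega : d.getD jv.2 0 ≤ jv.1 + 1)]
    · have hne : c ≠ jv.2 := fun h => hc h.symm
      split <;> simp [PySem.Dict.getD_insert_of_ne _ _ _ hne, hc]


-- a scan that resumes at index n with a nonzero best ≤ n+1 can never improve it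
lemma skip_noop (t : List Char) (c : Char) (n : Nat) (b : Int)
    (hb : ¬ b = 0) (hle : b ≤ (n : Int) + 1) :
    (PySem.List.enumerate t n).foldl (fun best jv =>
      if jv.2 == c && (best == 0 || jv.1 + 1 < best) then jv.1 + 1 else best) b = b := by
  induction t generalizing n with
  | nil => rfl
  | cons x rest ih =>
    rw [PySem.List.enumerate_cons, List.foldl_cons]
    have h1 : ((x == c) && (b == 0 || decide ((n : Int) + 1 < b))) = false := by
      simp [hb]; intro _; omega
    rw [h1]
    simp only [Bool.false_eq_true, if_false]
    have hcast : ((n : Int) + 1) = ((n + 1 : Nat) : Int) := by push_cast; ring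
    rw [hcast]
    exact ih (n + 1) (by push_cast; omega)

-- the index-scan fold equals the first-occurrence (find.go) rule
lemma pairfold_go (sL : List Char) (c : Char) (n : Nat) (b : Int) :
    (PySem.List.enumerate sL n).foldl (fun best jv =>
      if jv.2 == c && (best == 0 || jv.1 + 1 < best) then jv.1 + 1 else best) b
    = (if (PySem.Chars.find.go [c] sL n) != -1
          && (b == 0 || PySem.Chars.find.go [c] sL n + 1 < b)
       then PySem.Chars.find.go [c] sL n + 1 else b) := by
  induction sL generalizing n b with
  | nil => simp [PySem.Chars.find.go]
  | cons x rest ih =>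
    rw [PySem.List.enumerate_cons, List.foldl_cons]
    have hcast : ((n : Int) + 1) = ((n + 1 : Nat) : Int) := by push_cast; ring
    by_cases hx : x = c
    · subst hx
      have hpref : [x].isPrefixOf (x :: rest) = true := by simp [List.isPrefixOf]
      have hne : (((n : Nat) : Int) != -1) = true := by simp
      simp only [PySem.Chars.find.go, hpref, if_true, beq_self_eq_true, Bool.true_and, hne]
      by_cases hc : (b == 0 || decide ((n : Int) + 1 < b)) = true
      · simp only [hc, if_true]
        rw [hcast]
        exact skip_noop rest x (n + 1) ((n : Int) + 1) (by omega) (by push_cast; omega)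
      · simp only [hc, Bool.false_eq_true, if_false]
        simp only [Bool.or_eq_true, beq_iff_eq, decide_eq_true_eq, not_or] at hc
        rw [hcast]
        exact skip_noop rest x (n + 1) b hc.1 (by push_cast; omega)
    · have hpref : [c].isPrefixOf (x :: rest) = false := by
        simp [List.isPrefixOf]; exact fun h => hx h.symm
      have hxc : (x == c) = false := by simp [hx]
      simp only [PySem.Chars.find.go, hpref, hxc, Bool.false_and, Bool.false_eq_true, if_false,
        hcast]
      exact ih (n + 1) b

-- one string: the index-scan fold is exactly B's find-based update
lemma pairfold_find (k : String) (c : Char) (b : Int) :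
    (PySem.List.enumerate k.toList).foldl (fun best jv =>
      if jv.2 == c && (best == 0 || jv.1 + 1 < best) then jv.1 + 1 else best) b
    = (let p := PySem.Str.find k (String.ofList [c])
       if p != -1 && (b == 0 || p + 1 < b) then p + 1 else b) := by
  have h0 : PySem.Str.find k (String.ofList [c]) = PySem.Chars.find.go [c] k.toList 0 := by
    rw [PySem.Str.find_eq]
    simp [PySem.Chars.find]
  simpa [h0] using pairfold_go k.toList c 0 b

lemma build_gen (ks : List String) (d : PySem.Dict Char Int) (c : Char) :
    (ks.foldl (fun d i =>
      (PySem.List.enumerate i.toList).foldl (fun d jv =>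
        if d.getD jv.2 0 == 0 then d.insert jv.2 (jv.1 + 1)
        else d.insert jv.2 (min (d.getD jv.2 0) (jv.1 + 1))) d) d).getD c 0
    = ks.foldl (fun best k =>
        (PySem.List.enumerate k.toList).foldl (fun best jv =>
          if jv.2 == c && (best == 0 || jv.1 + 1 < best) then jv.1 + 1 else best) best) (d.getD c 0) := by
  induction ks generalizing d with
  | nil => rfl
  | cons k rest ih =>
    simp only [List.foldl_cons]
    rw [ih, inner_step]

-- whole keymap: the built dict's value at c equals B's best
lemma build_getD (keymap : List String) (c : Char) :
    (solutionBuild keymap).getD c 0 = solutionAltBest keymap c := by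
  unfold solutionBuild solutionAltBest
  rw [build_gen, PySem.Dict.getD_empty c (0 : Int)]
  have hstep : (fun (best : Int) (k : String) =>
      (PySem.List.enumerate k.toList).foldl (fun best jv =>
        if jv.2 == c && (best == 0 || jv.1 + 1 < best) then jv.1 + 1 else best) best)
    = (fun (best : Int) (k : String) =>
        let p := PySem.Str.find k (String.ofList [c])
        if p != -1 && (best == 0 || p + 1 < best) then p + 1 else best) := by
    funext b k; exact pairfold_find k c b
  rw [hstep]

lemma temp_eq (keymap : List String) (s : List Char) (t : Int) :
    s.foldl (fun temp j => temp + (solutionBuild keymap).getD j 0) t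
    = s.foldl (fun temp c => temp + solutionAltBest keymap c) t := by
  induction s generalizing t with
  | nil => rfl
  | cons c rest ih => simp only [List.foldl_cons, build_getD]

lemma ifeq (x : Int) : (if x == 0 then (-1 : Int) else x) = (if x != 0 then x else -1) := by
  by_cases h : x = 0 <;> simp [h]

lemma answers_eq (keymap : List String) (targets : List String) (acc : List Int) :
    targets.foldl (fun answer i =>
      answer ++ [if (i.toList.foldl (fun temp j => temp + (solutionBuild keymap).getD j 0) 0) == 0
                 then -1
                 else i.toList.foldl (fun temp j => temp + (solutionBuild keymap).getD j 0) 0]) acc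
    = targets.foldl (fun answer t =>
      answer ++ [if (t.toList.foldl (fun temp c => temp + solutionAltBest keymap c) 0) != 0
                 then t.toList.foldl (fun temp c => temp + solutionAltBest keymap c) 0
                 else -1]) acc := by
  simp only [temp_eq, ifeq]

-- ===== VERDICT (by name: the statement is the Claim_ definition above) =====
theorem solution_spec : Claim_equal_solution := by
  intro keymap targets _
  unfold Spec_solution solution solution_alt
  exact answers_eq keymap targets []
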